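-- pv_equiv track=rewrite | github.com/ldupleich/LeticiaDupleichProjects | Truth_Tables/optimize_truth_table_bdd.py | find_most_frequent_literal
-- ===== SOURCE A (Python) =====
-- def find_most_frequent_literal(pos_neg_count, literal_lists):
--     """
--     Find the most frequent literal by looking at which variable appears in the expression more often - this will be the root of the BDD.
--
--     If all variables appear one time, then return the first variable.
--
--     If there are more than one variables that have the same count >1 return the variable with most variance (e.g. a and ~a)
--
--     """
--     max_count = float('-inf');
--
--     # Iterate through the list and find the literal that has the highest combined positive and negative counts
--     for variable, values in pos_neg_count.items():
--         current_count = values[0] + values[1]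
--         if current_count > max_count:
--             max_count = current_count
--
--     candidates = []
--
--     # Iterate through the list and add all the literals with the max count to the candidates list
--     for variable, values in pos_neg_count.items():
--         count = values[0] + values[1]
--         if count == max_count:
--             candidates.append(variable)
--
--     # If there's only one candidate (maximum value) or there are no varying literals, the return the first candidate
--     if len(candidates) == 1 or all(value for value in pos_neg_count.values() if value[0] == 0 or value[1] == 0):
--         return candidates[0]
--
--     else:
--         for i in range(len(candidates)):
--             literal = candidates[i]
--             # Checking whether the variable has both a negated and non-negated instance
--             if pos_neg_count[literal][0] != 0 and pos_neg_count[literal][1] != 0: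
--                 # Returning the literal that had the most variance
--                 return literal
-- ===== SOURCE B (Python) =====
-- def find_most_frequent_literal(pos_neg_count, literal_lists):
--     # Single pass: keep the first variable whose combined count is maximal.
--     best = None
--     for variable, values in pos_neg_count.items():
--         count = values[0] + values[1]
--         if best is None or count > best[1]:
--             best = (variable, count)
--     return None if best is None else best[0]
-- ===== Notes on version B (the rewrite author's own statement) =====
-- stated objective: simpler
-- what changed: Replaces A's two full scans plus candidate-list construction and a dead tie-break branch (its all(...) guard over nonempty value lists is always true) with a single-pass first-argmax over the combined counts.
-- crash fix: On an empty pos_neg_count A raises IndexError at candidates[0]; B returns None. — e.g. on find_most_frequent_literal([], []): A raises IndexError, B returns none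
import Mathlib
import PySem

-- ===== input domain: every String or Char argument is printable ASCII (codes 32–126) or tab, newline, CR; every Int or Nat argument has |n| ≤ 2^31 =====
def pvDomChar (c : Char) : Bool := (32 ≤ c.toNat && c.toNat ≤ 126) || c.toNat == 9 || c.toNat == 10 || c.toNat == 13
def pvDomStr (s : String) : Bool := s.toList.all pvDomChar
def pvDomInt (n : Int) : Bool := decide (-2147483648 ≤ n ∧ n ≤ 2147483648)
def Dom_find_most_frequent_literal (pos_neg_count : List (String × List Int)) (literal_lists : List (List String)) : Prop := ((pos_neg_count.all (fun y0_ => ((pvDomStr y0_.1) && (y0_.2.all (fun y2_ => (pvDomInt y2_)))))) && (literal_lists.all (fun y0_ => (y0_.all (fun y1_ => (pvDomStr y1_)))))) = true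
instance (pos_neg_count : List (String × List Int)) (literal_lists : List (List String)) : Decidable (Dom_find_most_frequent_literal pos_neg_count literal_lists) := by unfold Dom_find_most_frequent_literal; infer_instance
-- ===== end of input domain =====

-- B replaces A's two scans + candidate list + dead tie-break branch by a single-pass first-argmax (objective: simpler).


-- ===== PORT A =====
-- values[0] + values[1]; exact when the list has ≥ 2 elements (guaranteed by Pre_); Python raises IndexError otherwise (excluded by Pre_)
def pvCntA (v : List Int) : Int := ((PySem.List.pyGet? v 0).getD 0) + ((PySem.List.pyGet? v 1).getD 0)

def find_most_frequent_literal (pos_neg_count : List (String × List Int)) (literal_lists : List (List String)) : Option String :=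
  -- max_count = float('-inf') modeled as `none` (strictly below every int); first loop
  let max_count : Option Int := pos_neg_count.foldl (fun mc p =>
      let current_count := pvCntA p.2
      match mc with
      | none => some current_count
      | some m => if current_count > m then some current_count else some m) none
  -- second loop: collect the candidates with the max count
  let candidates : List String := pos_neg_count.foldl (fun cs p =>
      if some (pvCntA p.2) = max_count then cs ++ [p.1] else cs) []
  -- all(value for value in pos_neg_count.values() if value[0] == 0 or value[1] == 0): a list value is truthy iff nonempty
  if candidates.length = 1 ∨ pos_neg_count.all (fun p =>
      if (PySem.List.pyGet? p.2 0).getD 0 = 0 ∨ (PySem.List.pyGet? p.2 1).getD 0 = 0 then !p.2.isEmpty else true)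
  then PySem.List.pyGet? candidates 0     -- candidates[0] (IndexError on empty → excluded by Pre_)
  else
    -- for i in range(len(candidates)): return the first candidate with both counts nonzero; fall-through returns None
    candidates.findSome? (fun literal =>
      match (PySem.Dict.mk pos_neg_count).get? literal with
      | some v => if ((PySem.List.pyGet? v 0).getD 0 ≠ 0 ∧ (PySem.List.pyGet? v 1).getD 0 ≠ 0) then some literal else none
      | none => none)

-- ===== PORT B =====
def find_most_frequent_literal_alt (pos_neg_count : List (String × List Int)) (literal_lists : List (List String)) : Option String :=
  let best : Option (String × Int) := pos_neg_count.foldl (fun best p =>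
      -- values[0] + values[1]; exact when the list has ≥ 2 elements (Pre_); Python raises IndexError otherwise (excluded by Pre_)
      let count := (PySem.List.pyGet? p.2 0).getD 0 + (PySem.List.pyGet? p.2 1).getD 0
      match best with
      | none => some (p.1, count)
      | some b => if count > b.2 then some (p.1, count) else some b) none
  best.map Prod.fst

-- ===== PRECONDITION & SPEC =====
-- Pre_ excludes exactly the inputs on which A raises IndexError: an empty pos_neg_count (candidates[0])
-- and value lists shorter than 2 (values[0] + values[1]).
def Pre_find_most_frequent_literal (pos_neg_count : List (String × List Int)) (literal_lists : List (List String)) : Prop :=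
  pos_neg_count ≠ [] ∧ (∀ p ∈ pos_neg_count, 2 ≤ p.2.length)
instance (pos_neg_count : List (String × List Int)) (literal_lists : List (List String)) : Decidable (Pre_find_most_frequent_literal pos_neg_count literal_lists) := by unfold Pre_find_most_frequent_literal; infer_instance

def pvWitness_find_most_frequent_literal : (List (String × List Int)) × List (List String) :=
  ([("a", [1, 0]), ("b", [0, 2])], [["a"]])

-- On an empty pos_neg_count A raises IndexError at candidates[0]; B returns None.
def Raises_find_most_frequent_literal (pos_neg_count : List (String × List Int)) (literal_lists : List (List String)) : Prop :=
  pos_neg_count = []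
instance (pos_neg_count : List (String × List Int)) (literal_lists : List (List String)) : Decidable (Raises_find_most_frequent_literal pos_neg_count literal_lists) := by unfold Raises_find_most_frequent_literal; infer_instance
def pvRaiseWitness_find_most_frequent_literal : (List (String × List Int)) × List (List String) := ([], [])
def pvRaiseWitnessOut_find_most_frequent_literal : Option String := none

def Spec_find_most_frequent_literal (pos_neg_count : List (String × List Int)) (literal_lists : List (List String)) (out : Option String) : Prop := out = find_most_frequent_literal_alt pos_neg_count literal_lists
instance (pos_neg_count : List (String × List Int)) (literal_lists : List (List String)) (out : Option String) : Decidable (Spec_find_most_frequent_literal pos_neg_count literal_lists out) := by unfold Spec_find_most_frequent_literal; infer_instance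

-- ===== CLAIM (what is proved, stated in full; the proofs are below) =====
def Claim_equal_find_most_frequent_literal : Prop := ∀ (pos_neg_count : List (String × List Int)) (literal_lists : List (List String)), Dom_find_most_frequent_literal pos_neg_count literal_lists → Pre_find_most_frequent_literal pos_neg_count literal_lists → Spec_find_most_frequent_literal pos_neg_count literal_lists (find_most_frequent_literal pos_neg_count literal_lists)
def Claim_raises_find_most_frequent_literal : Prop := (∀ (pos_neg_count : List (String × List Int)) (literal_lists : List (List String)), Dom_find_most_frequent_literal pos_neg_count literal_lists → Raises_find_most_frequent_literal pos_neg_count literal_lists → ¬ Pre_find_most_frequent_literal pos_neg_count literal_lists) ∧ (Dom_find_most_frequent_literal (pvRaiseWitness_find_most_frequent_literal.1) (pvRaiseWitness_find_most_frequent_literal.2) ∧ Raises_find_most_frequent_literal (pvRaiseWitness_find_most_frequent_literal.1) (pvRaiseWitness_find_most_frequent_literal.2) ∧ find_most_frequent_literal_alt (pvRaiseWitness_find_most_frequent_literal.1) (pvRaiseWitness_find_most_frequent_literal.2) = pvRaiseWitnessOut_find_most_frequent_literal)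

-- ===== LEMMAS AND PROOFS =====

-- running maximum of the combined counts, seeded with m
def pvMx (m : Int) : List (String × List Int) → Int
  | [] => m
  | p :: t => pvMx (max m (pvCntA p.2)) t

-- first-argmax relative to a current best (b, m)
def pvFam (b : String) (m : Int) : List (String × List Int) → String
  | [] => b
  | p :: t => if pvCntA p.2 > m then pvFam p.1 (pvCntA p.2) t else pvFam b m t

theorem pvMx_ge : ∀ (t : List (String × List Int)) (m : Int), m ≤ pvMx m t := by
  intro t
  induction t with
  | nil => intro m; simp [pvMx]
  | cons p t ih =>
      intro m
      have := ih (max m (pvCntA p.2))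
      simp only [pvMx]
      exact le_trans (le_max_left _ _) this

theorem pvCntA_def (v : List Int) :
    (PySem.List.pyGet? v 0).getD 0 + (PySem.List.pyGet? v 1).getD 0 = pvCntA v := rfl

theorem pvMaxfold_eq : ∀ (t : List (String × List Int)) (m : Int),
    t.foldl (fun mc p =>
      match mc with
      | none => some (pvCntA p.2)
      | some m => if pvCntA p.2 > m then some (pvCntA p.2) else some m) (some m)
    = some (pvMx m t) := by
  intro t
  induction t with
  | nil => intro m; simp [pvMx]
  | cons p t ih =>
      intro m
      simp only [List.foldl_cons, pvMx]
      by_cases h : pvCntA p.2 > m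
      · simp only [show (max m (pvCntA p.2)) = pvCntA p.2 by omega]
        simpa [h] using ih (pvCntA p.2)
      · simp only [show (max m (pvCntA p.2)) = m by omega]
        simpa [h] using ih m

theorem pvBfold_eq : ∀ (t : List (String × List Int)) (b : String) (m : Int),
    t.foldl (fun best p =>
      match best with
      | none => some (p.1, (PySem.List.pyGet? p.2 0).getD 0 + (PySem.List.pyGet? p.2 1).getD 0)
      | some b => if (PySem.List.pyGet? p.2 0).getD 0 + (PySem.List.pyGet? p.2 1).getD 0 > b.2
                  then some (p.1, (PySem.List.pyGet? p.2 0).getD 0 + (PySem.List.pyGet? p.2 1).getD 0) else some b) (some (b, m))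
    = some (pvFam b m t, pvMx m t) := by
  intro t
  induction t with
  | nil => intro b m; simp [pvFam, pvMx]
  | cons p t ih =>
      intro b m
      simp only [List.foldl_cons, pvFam, pvMx, pvCntA_def]
      by_cases h : pvCntA p.2 > m
      · simp only [show (max m (pvCntA p.2)) = pvCntA p.2 by omega]
        simpa [h] using ih p.1 (pvCntA p.2)
      · simp only [show (max m (pvCntA p.2)) = m by omega]
        simpa [h] using ih b m

theorem pvCandfold_eq : ∀ (t : List (String × List Int)) (acc : List String) (M : Int),
    t.foldl (fun cs p => if some (pvCntA p.2) = some M then cs ++ [p.1] else cs) acc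
    = acc ++ (t.filter (fun p => decide (pvCntA p.2 = M))).map Prod.fst := by
  intro t
  induction t with
  | nil => intro acc M; simp
  | cons p t ih =>
      intro acc M
      simp only [List.foldl_cons, List.filter_cons]
      by_cases h : pvCntA p.2 = M
      · rw [if_pos (by simp [h]), ih]
        simp [h]
      · rw [if_neg (by simp [h]), ih]
        simp [h]

theorem pvHead_filter : ∀ (l : List (String × List Int)) (q : (String × List Int) → Bool),
    PySem.List.pyGet? ((l.filter q).map Prod.fst) 0 = (l.find? q).map Prod.fst := by
  intro l q
  induction l with
  | nil => simp [PySem.List.pyGet?, PySem.List.pyIdx?]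
  | cons p t ih =>
      by_cases h : q p
      · simp [List.filter_cons, List.find?, h, PySem.List.pyGet?_zero_cons]
      · simp [List.filter_cons, List.find?, h, ih]

-- the key invariant: first element with maximal count (relative to a current best) = first-argmax
theorem pvG : ∀ (t : List (String × List Int)) (b : String) (m : Int),
    (if m = pvMx m t then some b
     else (t.find? (fun p => decide (pvCntA p.2 = pvMx m t))).map Prod.fst)
    = some (pvFam b m t) := by
  intro t
  induction t with
  | nil => intro b m; simp [pvMx, pvFam]
  | cons p t ih =>
      intro b m
      simp only [pvMx, pvFam]
      by_cases h : pvCntA p.2 > m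
      · simp only [show (max m (pvCntA p.2)) = pvCntA p.2 by omega]
        have hM := pvMx_ge t (pvCntA p.2)
        have hne : ¬ m = pvMx (pvCntA p.2) t := by omega
        have hih := ih p.1 (pvCntA p.2)
        rw [if_neg hne, if_pos h]
        by_cases he : pvCntA p.2 = pvMx (pvCntA p.2) t
        · rw [List.find?_cons_of_pos (p := fun (q : String × List Int) => decide (pvCntA q.2 = pvMx (pvCntA p.2) t)) (decide_eq_true he)]
          rw [if_pos he] at hih
          simpa using hih
        · rw [List.find?_cons_of_neg (p := fun (q : String × List Int) => decide (pvCntA q.2 = pvMx (pvCntA p.2) t)) (fun hc => he (of_decide_eq_true hc))]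
          rw [if_neg he] at hih
          exact hih
      · simp only [show (max m (pvCntA p.2)) = m by omega]
        have hih := ih b m
        rw [if_neg h]
        by_cases hm : m = pvMx m t
        · rw [if_pos hm]
          rw [if_pos hm] at hih
          exact hih
        · have hM := pvMx_ge t m
          have hlt : pvCntA p.2 < pvMx m t := by omega
          rw [if_neg hm]
          rw [List.find?_cons_of_neg (p := fun (q : String × List Int) => decide (pvCntA q.2 = pvMx m t)) (fun hc => absurd (of_decide_eq_true hc) (by omega))]
          rw [if_neg hm] at hih
          exact hih

-- ===== VERDICT (by name: the statement is the Claim_ definition above) =====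
theorem find_most_frequent_literal_spec : Claim_equal_find_most_frequent_literal := by
  intro pnc ll _hdom hpre
  unfold Spec_find_most_frequent_literal
  obtain ⟨hne, hlen⟩ := hpre
  match pnc with
  | [] => exact absurd rfl hne
  | (k, v) :: rest =>
    unfold find_most_frequent_literal find_most_frequent_literal_alt
    simp only [List.foldl_cons]
    -- the first loops: A's running max and B's running best
    simp only [pvMaxfold_eq, pvBfold_eq]
    -- the guard is always true: every value list is nonempty under Pre_
    have hguard : ((k, v) :: rest).all (fun p =>
        if (PySem.List.pyGet? p.2 0).getD 0 = 0 ∨ (PySem.List.pyGet? p.2 1).getD 0 = 0 then !p.2.isEmpty else true) = true := by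
      rw [List.all_eq_true]
      intro p hp
      have h2 := hlen p hp
      have hpe : p.2.isEmpty = false := by
        cases hq : p.2 with
        | nil => simp [hq] at h2
        | cons a l => simp [hq]
      split <;> simp [hpe]
    simp only [hguard, or_true, if_true]
    -- A's candidate loop over rest, starting from the head's contribution
    simp only [pvCandfold_eq]
    -- B's result via the invariant pvG
    have hG := pvG rest k (pvCntA v)
    simp only [pvCntA_def, Option.map_some]
    by_cases he : pvCntA v = pvMx (pvCntA v) rest
    · -- the head attains the max: candidates start with k, and B keeps k
      rw [if_pos (congrArg some he)]
      rw [if_pos he] at hG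
      simp only [List.nil_append, List.cons_append]
      rw [PySem.List.pyGet?_zero_cons]
      exact hG
    · -- the head does not attain the max
      rw [if_neg (fun hc => he (Option.some.inj hc))]
      rw [if_neg he] at hG
      simp only [List.nil_append]
      rw [pvHead_filter]
      exact hG

@[simp] theorem find_most_frequent_literal_raises : Claim_raises_find_most_frequent_literal := by
  unfold Claim_raises_find_most_frequent_literal
  constructor
  · intro pnc ll _ hr hpre
    exact hpre.1 hr
  · exact ⟨by decide, by decide, by decide⟩
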